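-- pv_equiv track=rewrite | github.com/factoryfuse/ffalgo | jss.py | prec_dict
-- ===== SOURCE A (Python) =====
-- def prec_dict(prec):
--     predecessors = {}
--     for op in range(1, 1+len(sum(prec,[]))):
--         pred = None
--         for sublist in prec:
--             if op in sublist:
--                 if sublist.index(op) > 0:
--                     pred = sublist[sublist.index(op) - 1]
--                 break
--         predecessors[op] = pred
--
--     return predecessors
-- ===== SOURCE B (Python) =====
-- def prec_dict(prec):
--     n = sum(len(s) for s in prec)
--     first_pred = {}
--     for sublist in prec:
--         prev = None
--         for v in sublist:
--             if v not in first_pred: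
--                 first_pred[v] = prev
--             prev = v
--     return {op: first_pred.get(op) for op in range(1, n + 1)}
-- ===== Notes on version B (the rewrite author's own statement) =====
-- stated objective: faster
-- what changed: Instead of rescanning all sublists (with 'in' and repeated .index) for every key 1..N, B makes one pass over the sublists recording each value's predecessor at its first occurrence, then builds the result dict from that map.
import Mathlib
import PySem

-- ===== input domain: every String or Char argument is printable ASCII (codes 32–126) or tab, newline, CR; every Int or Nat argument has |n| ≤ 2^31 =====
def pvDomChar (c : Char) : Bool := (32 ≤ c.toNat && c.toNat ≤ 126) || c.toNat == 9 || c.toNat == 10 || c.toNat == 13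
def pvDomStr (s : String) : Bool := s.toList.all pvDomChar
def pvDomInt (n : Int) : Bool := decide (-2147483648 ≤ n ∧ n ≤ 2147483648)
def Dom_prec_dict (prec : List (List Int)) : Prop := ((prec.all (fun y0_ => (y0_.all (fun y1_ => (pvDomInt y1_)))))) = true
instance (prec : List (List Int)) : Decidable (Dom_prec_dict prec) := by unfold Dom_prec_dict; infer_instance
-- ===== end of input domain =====

-- B replaces A's per-key rescans of all sublists with one pass that records each value's
-- first predecessor (objective: faster, O(N^2) → O(N)).

-- ===== PORT A =====
-- A's inner loop: scan the sublists in order; in the first sublist containing `op`,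
-- pred = sublist[sublist.index(op) - 1] if the index is positive, else None; then break.
def prec_dict_predA : List (List Int) → Int → Option Int
  | [], _ => none
  | s :: rest, op =>
    if op ∈ s then
      match PySem.List.index? s op with
      | some i => if 0 < i then PySem.List.pyGet? s ((i : Int) - 1) else none
      | none => none
    else prec_dict_predA rest op

def prec_dict (prec : List (List Int)) : List (Int × Option Int) :=
  ((PySem.List.pyRange 1 (1 + ((prec.foldl (· ++ ·) []).length : Int)) 1).foldl
      (fun d op => d.insert op (prec_dict_predA prec op))
      PySem.Dict.empty).items

-- ===== PORT B =====
-- B's inner loop over one sublist: state = (first_pred dict so far, previous element).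
def prec_dict_scanSub (d : PySem.Dict Int (Option Int)) (s : List Int) :
    PySem.Dict Int (Option Int) :=
  (s.foldl
      (fun (st : PySem.Dict Int (Option Int) × Option Int) v =>
        (if st.1.contains v then st.1 else st.1.insert v st.2, some v))
      (d, none)).1

def prec_dict_alt (prec : List (List Int)) : List (Int × Option Int) :=
  ((PySem.List.pyRange 1 (1 + (((prec.map List.length).sum : Nat) : Int)) 1).foldl
      (fun d op =>
        d.insert op ((prec.foldl prec_dict_scanSub PySem.Dict.empty).getD op none))
      PySem.Dict.empty).items

-- ===== PRECONDITION & SPEC =====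
def Spec_prec_dict (prec : List (List Int)) (out : List (Int × Option Int)) : Prop := out = prec_dict_alt prec
instance (prec : List (List Int)) (out : List (Int × Option Int)) : Decidable (Spec_prec_dict prec out) := by unfold Spec_prec_dict; infer_instance

-- ===== CLAIM (what is proved, stated in full; the proofs are below) =====
def Claim_equal_prec_dict : Prop := ∀ (prec : List (List Int)), Dom_prec_dict prec → Spec_prec_dict prec (prec_dict prec)

-- ===== LEMMAS AND PROOFS =====

-- Specification of a single-sublist scan: the value recorded for v, given the element
-- `prev` preceding the scan (none at the head of a sublist).
def pvFirstIn (prev : Option Int) : List Int → Int → Option (Option Int)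
  | [], _ => none
  | x :: xs, v => if x = v then some prev else pvFirstIn (some x) xs v

-- Specification of the whole pass: first sublist containing v wins.
def pvFirst : List (List Int) → Int → Option (Option Int)
  | [], _ => none
  | s :: rest, v => (pvFirstIn none s v).or (pvFirst rest v)

theorem pvFirstIn_char (s : List Int) (v : Int) (prev : Option Int) :
    pvFirstIn prev s v =
      (PySem.List.index? s v).map
        (fun (i : Nat) => if i = 0 then prev else PySem.List.pyGet? s ((i : Int) - 1)) := by
  induction s generalizing prev with
  | nil => simp [pvFirstIn, PySem.List.index?]
  | cons x xs ih =>
    by_cases hx : x = v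
    · subst hx
      rw [PySem.List.index?_cons_self]
      simp [pvFirstIn]
    · rw [show pvFirstIn prev (x :: xs) v = pvFirstIn (some x) xs v from by
        simp [pvFirstIn, hx], PySem.List.index?_cons_of_ne xs hx, ih]
      cases h : PySem.List.index? xs v with
      | none => rfl
      | some j =>
        simp only [Option.map_some]
        congr 1
        have hc1 : ((j + 1 : Nat) : Int) - 1 = ((j : Nat) : Int) := by push_cast; ring
        rw [if_neg (by omega : ¬ j + 1 = 0), hc1, PySem.List.pyGet?_natCast]
        cases j with
        | zero => simp
        | succ k =>
          have hc2 : ((k + 1 : Nat) : Int) - 1 = ((k : Nat) : Int) := by push_cast; ring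
          rw [if_neg (by omega : ¬ k + 1 = 0), hc2, PySem.List.pyGet?_natCast]
          simp

theorem scanSub_get? (s : List Int) (d : PySem.Dict Int (Option Int)) (prev : Option Int)
    (v : Int) :
    ((s.foldl
        (fun (st : PySem.Dict Int (Option Int) × Option Int) v =>
          (if st.1.contains v then st.1 else st.1.insert v st.2, some v))
        (d, prev)).1).get? v = (d.get? v).or (pvFirstIn prev s v) := by
  induction s generalizing d prev with
  | nil => simp [pvFirstIn]
  | cons x xs ih =>
    simp only [List.foldl_cons, pvFirstIn, ih]
    by_cases hx : x = v
    · subst hx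
      by_cases hc : d.contains x
      · have : (d.get? x).isSome := by rw [← PySem.Dict.contains_eq_isSome_get?, hc]
        obtain ⟨w, hw⟩ := Option.isSome_iff_exists.mp this
        simp [hc, hw]
      · have hnone : d.get? x = none := by
          rw [PySem.Dict.get?_eq_none_iff_contains]
          simpa using hc
        simp [hc, hnone, PySem.Dict.get?_insert_self]
    · by_cases hc : d.contains x
      · simp [hc, if_neg hx]
      · simp [hc, PySem.Dict.get?_insert_of_ne d prev (Ne.symm hx), if_neg hx]

theorem pass_get? (prec : List (List Int)) (d : PySem.Dict Int (Option Int)) (v : Int) :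
    (prec.foldl prec_dict_scanSub d).get? v = (d.get? v).or (pvFirst prec v) := by
  induction prec generalizing d with
  | nil => simp [pvFirst]
  | cons s rest ih =>
    simp only [List.foldl_cons, pvFirst, ih, prec_dict_scanSub, scanSub_get?,
      Option.or_assoc]

theorem predA_eq_getD (prec : List (List Int)) (op : Int) :
    prec_dict_predA prec op =
      (prec.foldl prec_dict_scanSub PySem.Dict.empty).getD op none := by
  rw [PySem.Dict.getD_eq_get?_getD, pass_get?]
  simp only [PySem.Dict.get?_empty, Option.none_or]
  induction prec with
  | nil => simp [prec_dict_predA, pvFirst]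
  | cons s rest ih =>
    by_cases hs : op ∈ s
    · have hidx : (PySem.List.index? s op).isSome := by
        rw [PySem.List.index?_isSome_iff]; exact hs
      obtain ⟨i, hi⟩ := Option.isSome_iff_exists.mp hidx
      simp only [prec_dict_predA, if_pos hs, pvFirst, pvFirstIn_char, hi, Option.map_some,
        Option.some_or, Option.getD_some]
      rcases Nat.eq_zero_or_pos i with h0 | h0
      · simp [h0]
      · simp [Nat.pos_iff_ne_zero.mp h0, h0]
    · have hnone : pvFirstIn none s op = none := by
        rw [pvFirstIn_char, (PySem.List.index?_eq_none_iff s op).mpr hs]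
        rfl
      simp only [prec_dict_predA, if_neg hs, pvFirst, hnone, Option.none_or]
      exact ih

theorem len_foldl_append (prec : List (List Int)) :
    (prec.foldl (· ++ ·) []).length = (prec.map List.length).sum := by
  have h : ∀ (l : List (List Int)) (a : List Int),
      l.foldl (· ++ ·) a = a ++ l.flatten := by
    intro l
    induction l with
    | nil => simp
    | cons x xs ih => intro a; simp [ih, List.append_assoc]
  rw [h, List.nil_append, List.length_flatten]

-- ===== VERDICT (by name: the statement is the Claim_ definition above) =====
theorem prec_dict_spec : Claim_equal_prec_dict := by
  intro prec _
  show prec_dict prec = prec_dict_alt prec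
  unfold prec_dict prec_dict_alt
  rw [len_foldl_append]
  simp only [predA_eq_getD]
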